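-- pv_equiv track=rewrite | github.com/nebulae/ntntn.io | app/src/models.py | tokenize_autocomplete
-- ===== SOURCE A (Python) =====
-- def tokenize_autocomplete(phrase):
--     a = []
--     for word in phrase.split():
--         j = 1
--         while True:
--             for i in range(len(word) - j + 1):
--                 a.append(word[i:i + j])
--             if j == len(word):
--                 break
--             j += 1
--     return a
-- ===== SOURCE B (Python) =====
-- def tokenize_autocomplete(phrase):
--     out = []
--     for word in phrase.split():
--         n = len(word)
--         by_len = {}
--         for i in range(n):
--             for j in range(i + 1, n + 1):
--                 by_len.setdefault(j - i, []).append(word[i:j])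
--         for L in range(1, n + 1):
--             out += by_len.get(L, [])
--     return out
-- ===== Notes on version B (the rewrite author's own statement) =====
-- stated objective: alternative
-- what changed: A regenerates substrings length-major (one inner scan over the word per substring length); B makes a single start-major pass per word, grouping substrings by length in a dict, and then emits the groups in increasing length.
import Mathlib
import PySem

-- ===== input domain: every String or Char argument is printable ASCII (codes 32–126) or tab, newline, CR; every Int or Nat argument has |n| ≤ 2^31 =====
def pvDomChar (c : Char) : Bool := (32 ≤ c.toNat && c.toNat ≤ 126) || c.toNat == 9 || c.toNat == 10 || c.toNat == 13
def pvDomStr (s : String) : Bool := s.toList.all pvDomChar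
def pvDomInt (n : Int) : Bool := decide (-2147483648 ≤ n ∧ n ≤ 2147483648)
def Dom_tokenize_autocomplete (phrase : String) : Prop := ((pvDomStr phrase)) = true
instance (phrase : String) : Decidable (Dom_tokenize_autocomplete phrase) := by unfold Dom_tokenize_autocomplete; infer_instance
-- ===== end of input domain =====

-- B replaces A's length-major regeneration loop (one inner pass over the word per substring
-- length) by a single start-major pass that groups the substrings by length in a dict and then
-- emits the groups in increasing length; same cost class, different traversal (objective: alternative).

-- ===== PORT A =====
-- inner 'for i in range(len(word) - j + 1): a.append(word[i:i + j])'
def pvRowA (w : List Char) (j : Int) : List String :=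
  (PySem.List.pyRange 0 ((w.length : Int) - j + 1)).map
    (fun i => String.mk (PySem.List.slice w (some i) (some (i + j))))

-- 'while True: <row>; if j == len(word): break; j += 1'.  The continue-guard is written j < len(word):
-- it coincides with Python's 'j == len(word)' exit test on every state the Python loop reaches
-- (j starts at 1 and words produced by split() are nonempty, so j ≤ len(word) throughout).
def pvWhileA (w : List Char) (j : Nat) : List String :=
  pvRowA w (j : Int) ++ (if h : j < w.length then pvWhileA w (j + 1) else [])
termination_by w.length - j

def tokenize_autocomplete (phrase : String) : List String :=
  (PySem.Str.split₀ phrase).foldl (fun a word => a ++ pvWhileA word.toList 1) []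

-- ===== PORT B =====
-- 'for i in range(n): for j in range(i+1, n+1): by_len.setdefault(j-i, []).append(word[i:j])'
def pvGroupB (w : List Char) : PySem.Dict Int (List String) :=
  (PySem.List.pyRange 0 (w.length : Int)).foldl
    (fun d i =>
      (PySem.List.pyRange (i + 1) ((w.length : Int) + 1)).foldl
        (fun d j => d.modify (j - i) [] (fun b => b ++ [String.mk (PySem.List.slice w (some i) (some j))])) d)
    PySem.Dict.empty

-- per-word body: build by_len, then 'for L in range(1, n+1): out += by_len.get(L, [])'
def pvEmitB (w : List Char) (out : List String) : List String :=
  let d := pvGroupB w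
  (PySem.List.pyRange 1 ((w.length : Int) + 1)).foldl (fun out L => out ++ d.getD L []) out

def tokenize_autocomplete_alt (phrase : String) : List String :=
  (PySem.Str.split₀ phrase).foldl (fun out word => pvEmitB word.toList out) []

-- ===== PRECONDITION & SPEC =====
def Spec_tokenize_autocomplete (phrase : String) (out : List String) : Prop := out = tokenize_autocomplete_alt phrase
instance (phrase : String) (out : List String) : Decidable (Spec_tokenize_autocomplete phrase out) := by unfold Spec_tokenize_autocomplete; infer_instance

-- ===== CLAIM (what is proved, stated in full; the proofs are below) =====
def Claim_equal_tokenize_autocomplete : Prop := ∀ (phrase : String), Dom_tokenize_autocomplete phrase → Spec_tokenize_autocomplete phrase (tokenize_autocomplete phrase)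

-- ===== LEMMAS AND PROOFS =====

-- the row of substrings of w of length L, in start order (A's inner loop, on the Nat side)
def pvRow (w : List Char) (L : Nat) : List String :=
  (List.range (w.length - L + 1)).map (fun i => String.mk ((w.drop i).take L))

lemma pyRange_nil (a b : Int) (h : b ≤ a) : PySem.List.pyRange a b = [] := by
  simp [PySem.List.pyRange]; omega
lemma pyRange_natCast (a b : Nat) :
    PySem.List.pyRange (a : Int) (b : Int) = (List.range' a (b - a)).map (fun k : Nat => (k : Int)) := by
  by_cases h : b ≤ a
  · rw [pyRange_nil _ _ (by exact_mod_cast h)]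
    simp [Nat.sub_eq_zero_of_le h]
  · rw [PySem.List.pyRange_one_cons (by exact_mod_cast (by omega : a < b))]
    have h2 : b - a = (b - (a + 1)) + 1 := by omega
    rw [h2, List.range'_succ]
    have ih := pyRange_natCast (a + 1) b
    push_cast at ih
    simp [ih]
termination_by b - a
decreasing_by omega
lemma filter_beq_range'_nat (a n c : Nat) :
    (List.range' a n).filter (fun m => m == c) = if a ≤ c ∧ c < a + n then [c] else [] := by
  induction n generalizing a with
  | zero => simp only [List.range'_zero, List.filter_nil]; rw [if_neg (by omega)]
  | succ n ih =>
    rw [List.range'_succ, List.filter_cons]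
    by_cases h : a = c
    · subst h
      simp only [beq_self_eq_true, if_pos]
      have hnil : (List.range' (a+1) n).filter (fun m => m == a) = [] := by
        apply List.filter_eq_nil_iff.mpr
        intro m hm
        simp only [List.mem_range'_1] at hm
        simp [beq_iff_eq]; omega
      rw [hnil, if_pos (by omega)]
    · rw [if_neg (by simp [beq_iff_eq]; exact h), ih (a+1)]
      by_cases h2 : a + 1 ≤ c ∧ c < a + 1 + n
      · rw [if_pos h2, if_pos (by omega)]
      · rw [if_neg h2, if_neg (by omega)]
lemma flatMap_if_lt {α : Type} (n m : Nat) (f : Nat → α) :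
    (List.range n).flatMap (fun k => if k < m then [f k] else []) = (List.range (min m n)).map f := by
  induction n with
  | zero => simp
  | succ n ih =>
    rw [List.range_succ, List.flatMap_append, ih]
    by_cases h : n < m
    · rw [Nat.min_eq_right (by omega), Nat.min_eq_right (by omega), List.range_succ]
      simp [h]
    · rw [Nat.min_eq_left (by omega), Nat.min_eq_left (by omega)]
      simp [h]

lemma rowA_eq (w : List Char) (L : Nat) (h2 : L ≤ w.length) :
    pvRowA w (L : Int) = pvRow w L := by
  unfold pvRowA pvRow
  have h3 : (w.length : Int) - L + 1 = ((w.length - L + 1 : Nat) : Int) := by push_cast; omega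
  rw [h3, PySem.List.pyRange_zero_natCast, List.map_map]
  apply List.map_congr_left
  intro k hk
  simp only [List.mem_range] at hk
  simp only [Function.comp]
  have : ((k : Int) + (L : Int)) = ((k + L : Nat) : Int) := by push_cast; ring
  rw [this, PySem.List.slice_natCast]
  congr 2
  omega

lemma whileA_eq (w : List Char) (j : Nat) (h1 : 1 ≤ j) (h2 : j ≤ w.length) :
    pvWhileA w j = (List.range' j (w.length - j + 1)).flatMap (pvRow w) := by
  rw [pvWhileA]
  by_cases h : j < w.length
  · rw [dif_pos h, rowA_eq w j h2, whileA_eq w (j+1) (by omega) (by omega)]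
    have h3 : w.length - j + 1 = (w.length - (j+1) + 1) + 1 := by omega
    rw [h3]
    conv_rhs => rw [List.range'_succ]
    rw [List.flatMap_cons]
  · rw [dif_neg h]
    have hj : j = w.length := by omega
    subst hj
    simp [rowA_eq w w.length (le_refl _)]
termination_by w.length - j
decreasing_by omega


lemma groupB_getD (w : List Char) (L : Nat) (h1 : 1 ≤ L) (h2 : L ≤ w.length) :
    (pvGroupB w).getD (L : Int) [] = pvRow w L := by
  unfold pvGroupB
  have hinner : ∀ (d : PySem.Dict Int (List String)) (i : Int),
      (PySem.List.pyRange (i + 1) ((w.length : Int) + 1)).foldl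
        (fun d j => d.modify (j - i) [] (fun b => b ++ [String.mk (PySem.List.slice w (some i) (some j))])) d
      = ((PySem.List.pyRange (i + 1) ((w.length : Int) + 1)).map
          (fun j => (j - i, String.mk (PySem.List.slice w (some i) (some j))))).foldl
          (fun d p => d.modify p.1 [] (fun b => b ++ [p.2])) d := by
    intro d i
    rw [List.foldl_map]
  simp only [hinner]
  rw [← List.foldl_flatMap, PySem.Dict.getD_foldl_modify_append]
  have hemp : (PySem.Dict.empty : PySem.Dict Int (List String)).getD (L : Int) [] = [] := by
    simp [pysem]
  rw [hemp, List.nil_append, List.filter_flatMap, List.map_flatMap,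
      PySem.List.pyRange_zero_natCast, List.flatMap_map]
  have hF : ∀ k ∈ List.range w.length,
      (List.map (fun x => x.2) (List.filter (fun p => p.1 == (L : Int))
        ((PySem.List.pyRange ((k : Int) + 1) ((w.length : Int) + 1)).map
          (fun j => (j - (k : Int), String.mk (PySem.List.slice w (some (k : Int)) (some j)))))))
      = (fun k => if k < w.length - L + 1 then [String.mk ((w.drop k).take L)] else []) k := by
    intro k hk
    simp only [List.mem_range] at hk
    have e1 : ((k : Int) + 1) = ((k + 1 : Nat) : Int) := by push_cast; ring
    have e2 : ((w.length : Int) + 1) = ((w.length + 1 : Nat) : Int) := by push_cast; ring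
    rw [e1, e2, pyRange_natCast, List.map_map, List.filter_map]
    simp only [Function.comp_def]
    have hpredEq : (List.range' (k + 1) (w.length + 1 - (k + 1))).filter
          (fun m : Nat => ((m : Int) - (k : Int) == (L : Int))) =
        (List.range' (k + 1) (w.length + 1 - (k + 1))).filter (fun m : Nat => m == k + L) := by
      apply List.filter_congr
      intro m hm
      by_cases hm2 : m = k + L
      · subst hm2; simp
      · have hne1 : ¬ ((m : Int) - (k : Int) = (L : Int)) := by omega
        simp [hne1, hm2]
    rw [hpredEq, filter_beq_range'_nat]
    have hcond : ((k + 1 ≤ k + L ∧ k + L < k + 1 + (w.length + 1 - (k + 1)))) ↔ (k < w.length - L + 1) := by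
      omega
    rw [if_congr hcond rfl rfl]
    by_cases hlt : k < w.length - L + 1
    · rw [if_pos hlt, if_pos hlt]
      simp only [List.map_cons, List.map_nil]
      rw [PySem.List.slice_natCast]
      congr 3
      omega
    · rw [if_neg hlt, if_neg hlt]
      simp
  rw [List.flatMap_congr hF, flatMap_if_lt]
  rw [Nat.min_eq_left (by omega)]
  rfl

lemma emitB_eq (w : List Char) (out : List String) :
    pvEmitB w out = out ++ pvWhileA w 1 := by
  simp only [pvEmitB]
  have hr := pyRange_natCast 1 (w.length + 1)
  norm_num at hr
  rw [hr, List.foldl_map, PySem.List.foldl_append_eq_flatMap]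
  by_cases hn : w.length = 0
  · have hw : w = [] := List.eq_nil_of_length_eq_zero hn
    subst hw
    rw [pvWhileA, dif_neg (by simp)]
    simp [pvRowA, pyRange_nil 0 0 le_rfl]
  · rw [whileA_eq w 1 le_rfl (by omega)]
    have h4 : w.length - 1 + 1 = w.length := by omega
    rw [h4]
    congr 1
    apply List.flatMap_congr
    intro L hL
    simp only [List.mem_range'_1] at hL
    exact groupB_getD w L hL.1 (by omega)

lemma foldl_words (ws : List String) (out : List String) :
    ws.foldl (fun out word => pvEmitB word.toList out) out =
      ws.foldl (fun a word => a ++ pvWhileA word.toList 1) out := by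
  have h : (fun (out : List String) (word : String) => pvEmitB word.toList out) =
      (fun a word => a ++ pvWhileA word.toList 1) := by
    funext a word
    exact emitB_eq _ _
  rw [h]

-- ===== VERDICT (by name: the statement is the Claim_ definition above) =====
theorem tokenize_autocomplete_spec : Claim_equal_tokenize_autocomplete := by
  intro phrase _
  unfold Spec_tokenize_autocomplete tokenize_autocomplete tokenize_autocomplete_alt
  rw [foldl_words]
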